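-- pv_equiv track=rewrite | github.com/austinProGit/scheduler | src/schedule_inspector.py | senior_with_1000_level_count
-- ===== SOURCE A (Python) =====
-- def schedule_length(schedule):
--     return len(schedule)
--
-- def semester_type_sequence(schedule):
--     SEMESTER_TYPE_SUCCESSOR = {'Fa': 'Sp', 'Sp': 'Su', 'Su': 'Fa'}
--     sequence = None
--     previous_season = 'Su'
--     if schedule_length(schedule) > 0:
--         sequence = []
--         for semester in schedule:
--             sequence.append(SEMESTER_TYPE_SUCCESSOR[previous_season])
--             previous_season = SEMESTER_TYPE_SUCCESSOR[previous_season]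
--     return sequence
--
-- def last_semester_type(schedule):
--     semester_types = semester_type_sequence(schedule)
--     if semester_types != None:
--         return semester_types[-1]
--     else: return None
--
-- def senior_interval(schedule):
--     last_type = last_semester_type(schedule)
--     if last_type == 'Su':
--         return -3
--     if last_type == 'Sp':
--         return -2
--     if last_type == 'Fa':
--         return -1
--
-- def senior_year_semesters_list(schedule):
--     if schedule == None or schedule == [] or schedule == [[]]:
--         return None
--     senior_semesters = []
--     index = senior_interval(schedule)
--     for i in range(index, 0):
--         for semester in schedule[i]:
--             senior_semesters.append(semester)
--     return senior_semesters
--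
-- def senior_with_1000_level_count(schedule):
--     message = ''
--     count = 0
--     senior_year = senior_year_semesters_list(schedule)
--     if senior_year != None:
--         for course in senior_year:
--             if ' 1' in course:
--                 count += 1
--                 message += '1000 level course ' + course + ' detected in senior year.\n'
--     return count, message
-- ===== SOURCE B (Python) =====
-- def senior_with_1000_level_count(schedule):
--     if schedule is None or schedule == [] or schedule == [[]]:
--         return 0, ''
--     k = (len(schedule) - 1) % 3 + 1
--     hits = [course for semester in schedule[-k:] for course in semester if ' 1' in course]
--     return len(hits), ''.join('1000 level course ' + c + ' detected in senior year.\n' for c in hits)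
-- ===== Notes on version B (the rewrite author's own statement) =====
-- stated objective: simpler
-- what changed: Inlines A's five-helper chain: the senior start index is computed in closed form as (len-1)%3+1 instead of simulating the Fa/Sp/Su season sequence over the whole schedule, and the result is built by a slice/flatten/filter comprehension plus join instead of accumulator loops over a negative-index range.
import Mathlib
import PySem

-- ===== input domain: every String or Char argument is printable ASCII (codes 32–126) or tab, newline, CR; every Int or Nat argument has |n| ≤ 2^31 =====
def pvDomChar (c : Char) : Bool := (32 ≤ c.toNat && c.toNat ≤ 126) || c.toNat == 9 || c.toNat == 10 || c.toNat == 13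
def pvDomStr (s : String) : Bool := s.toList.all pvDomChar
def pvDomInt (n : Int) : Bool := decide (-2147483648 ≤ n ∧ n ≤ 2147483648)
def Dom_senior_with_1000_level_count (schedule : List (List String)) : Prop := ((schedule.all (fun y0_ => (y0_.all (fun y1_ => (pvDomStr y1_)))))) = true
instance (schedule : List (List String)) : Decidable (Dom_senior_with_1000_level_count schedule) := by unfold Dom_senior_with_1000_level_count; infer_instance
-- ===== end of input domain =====

-- B inlines A's five-helper chain: the senior start index is computed in closed form and the
-- hits are collected by slice/flatMap/filter + join instead of season-sequence simulation and
-- accumulator loops (objective: simpler).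

-- ===== PORT A =====
def schedule_length (schedule : List (List String)) : Int := schedule.length

def pvSEMESTER_TYPE_SUCCESSOR : PySem.Dict String String :=
  (((PySem.Dict.empty).insert "Fa" "Sp").insert "Sp" "Su").insert "Su" "Fa"

def semester_type_sequence (schedule : List (List String)) : Option (List String) :=
  -- sequence = None; previous_season = 'Su'; loop appends successor and advances it
  -- (dict lookup can never miss here, since 'Su' and all successor values are keys: getD "" is the KeyError fill-in)
  if schedule_length schedule > 0 then
    some ((schedule.foldl
      (fun (st : List String × String) _ =>
        (st.1 ++ [PySem.Dict.getD pvSEMESTER_TYPE_SUCCESSOR st.2 ""],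
         PySem.Dict.getD pvSEMESTER_TYPE_SUCCESSOR st.2 "")) ([], "Su")).1)
  else none

def last_semester_type (schedule : List (List String)) : Option String :=
  match semester_type_sequence schedule with
  | some semester_types => PySem.List.pyGet? semester_types (-1)  -- [-1] on a nonempty list: never none here
  | none => none

def senior_interval (schedule : List (List String)) : Option Int :=
  let last_type := last_semester_type schedule
  if last_type = some "Su" then some (-3)
  else if last_type = some "Sp" then some (-2)
  else if last_type = some "Fa" then some (-1)
  else none  -- Python falls off the end returning None

def senior_year_semesters_list (schedule : List (List String)) : Option (List String) :=
  if schedule = [] ∨ schedule = [[]] then none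
  else
    let index := (senior_interval schedule).getD 0  -- always some here; getD 0 is the TypeError fill-in
    some ((PySem.List.pyRange index 0 1).foldl
      (fun acc i => acc ++ ((PySem.List.pyGet? schedule i).getD [])) [])  -- index always in range here

def senior_with_1000_level_count (schedule : List (List String)) : Int × String :=
  match senior_year_semesters_list schedule with
  | none => (0, "")
  | some senior_year =>
      senior_year.foldl
        (fun (st : Int × String) course =>
          if PySem.Str.isIn " 1" course then
            (st.1 + 1, st.2 ++ ("1000 level course " ++ course ++ " detected in senior year.\n"))
          else st) (0, "")

-- ===== PORT B =====
def senior_with_1000_level_count_alt (schedule : List (List String)) : Int × String :=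
  if schedule = [] ∨ schedule = [[]] then (0, "")
  else
    let k : Nat := (schedule.length - 1) % 3 + 1
    let hits := (PySem.List.slice schedule (some (-(k : Int))) none).flatMap
      (fun semester => semester.filter (fun course => PySem.Str.isIn " 1" course))
    ((hits.length : Int),
      PySem.Str.join "" (hits.map
        (fun c => "1000 level course " ++ c ++ " detected in senior year.\n")))

-- ===== PRECONDITION & SPEC =====
def Spec_senior_with_1000_level_count (schedule : List (List String)) (out : Int × String) : Prop := out = senior_with_1000_level_count_alt schedule
instance (schedule : List (List String)) (out : Int × String) : Decidable (Spec_senior_with_1000_level_count schedule out) := by unfold Spec_senior_with_1000_level_count; infer_instance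

-- ===== CLAIM (what is proved, stated in full; the proofs are below) =====
def Claim_equal_senior_with_1000_level_count : Prop := ∀ (schedule : List (List String)), Dom_senior_with_1000_level_count schedule → Spec_senior_with_1000_level_count schedule (senior_with_1000_level_count schedule)

-- ===== LEMMAS AND PROOFS =====

theorem pv_join_nil_cons (x : List Char) (xs : List (List Char)) :
    PySem.Chars.join [] (x :: xs) = x ++ PySem.Chars.join [] xs := by
  cases xs with
  | nil => simp [PySem.Chars.join, List.intercalate]
  | cons y ys => rw [PySem.Chars.join_cons_cons]; simp

theorem pv_strjoin_nil_cons (x : String) (xs : List String) :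
    PySem.Str.join "" (x :: xs) = x ++ PySem.Str.join "" xs := by
  simp [PySem.Str.join, pv_join_nil_cons, String.ofList_append]

-- the state-advancing step of A's season loop
theorem pv_seq_fold_snd (l : List (List String)) : ∀ (s : String) (acc : List String),
    (l.foldl (fun (st : List String × String) _ =>
      (st.1 ++ [PySem.Dict.getD pvSEMESTER_TYPE_SUCCESSOR st.2 ""],
       PySem.Dict.getD pvSEMESTER_TYPE_SUCCESSOR st.2 "")) (acc, s)).2
    = (fun t => PySem.Dict.getD pvSEMESTER_TYPE_SUCCESSOR t "")^[l.length] s := by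
  induction l with
  | nil => intro s acc; simp
  | cons a l ih =>
      intro s acc
      simp only [List.foldl_cons, List.length_cons, ih, Function.iterate_succ_apply]

theorem pv_seq_fold_last (l : List (List String)) : ∀ (s : String) (acc : List String), l ≠ [] →
    ((l.foldl (fun (st : List String × String) _ =>
      (st.1 ++ [PySem.Dict.getD pvSEMESTER_TYPE_SUCCESSOR st.2 ""],
       PySem.Dict.getD pvSEMESTER_TYPE_SUCCESSOR st.2 "")) (acc, s)).1).getLast?
    = some ((l.foldl (fun (st : List String × String) _ =>
      (st.1 ++ [PySem.Dict.getD pvSEMESTER_TYPE_SUCCESSOR st.2 ""],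
       PySem.Dict.getD pvSEMESTER_TYPE_SUCCESSOR st.2 "")) (acc, s)).2) := by
  induction l with
  | nil => intro _ _ h; exact absurd rfl h
  | cons a l ih =>
      intro s acc _
      by_cases hl : l = []
      · subst hl; simp
      · simp only [List.foldl_cons]; exact ih _ _ hl

theorem pv_iter_su (n : Nat) :
    (fun t => PySem.Dict.getD pvSEMESTER_TYPE_SUCCESSOR t "")^[n] "Su"
    = if n % 3 = 0 then "Su" else if n % 3 = 1 then "Fa" else "Sp" := by
  induction n with
  | zero => simp
  | succ n ih =>
      rw [Function.iterate_succ_apply', ih]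
      rcases (show n % 3 = 0 ∨ n % 3 = 1 ∨ n % 3 = 2 by omega) with h | h | h
      · have h1 : (n + 1) % 3 = 1 := by omega
        simp only [h, h1]; decide
      · have h1 : (n + 1) % 3 = 2 := by omega
        simp only [h, h1]; decide
      · have h1 : (n + 1) % 3 = 0 := by omega
        simp only [h, h1]; decide

theorem pv_interval_eq (schedule : List (List String)) (h : schedule ≠ []) :
    senior_interval schedule = some (-(((schedule.length - 1) % 3 + 1 : Nat) : Int)) := by
  have hpos : 0 < schedule.length := List.length_pos_iff.mpr h
  have hcond : schedule_length schedule > 0 := by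
    simp [schedule_length]; exact_mod_cast hpos
  unfold senior_interval last_semester_type semester_type_sequence
  rw [if_pos hcond]
  dsimp only
  rw [PySem.List.pyGet?_neg_one, pv_seq_fold_last _ _ _ h, pv_seq_fold_snd, pv_iter_su]
  rcases (show schedule.length % 3 = 0 ∨ schedule.length % 3 = 1 ∨ schedule.length % 3 = 2 by omega) with h3 | h3 | h3
  · have hk : (schedule.length - 1) % 3 + 1 = 3 := by omega
    simp [h3, hk]
  · have hk : (schedule.length - 1) % 3 + 1 = 1 := by omega
    simp [h3, hk]
  · have hk : (schedule.length - 1) % 3 + 1 = 2 := by omega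
    simp [h3, hk]

-- A's counting loop in closed form
theorem pv_count_fold (l : List String) : ∀ (c : Int) (m : String),
    l.foldl (fun (st : Int × String) course =>
        if PySem.Str.isIn " 1" course then
          (st.1 + 1, st.2 ++ ("1000 level course " ++ course ++ " detected in senior year.\n"))
        else st) (c, m)
    = (c + (((l.filter (fun course => PySem.Str.isIn " 1" course)).length : Nat) : Int),
       m ++ PySem.Str.join "" ((l.filter (fun course => PySem.Str.isIn " 1" course)).map
         (fun cr => "1000 level course " ++ cr ++ " detected in senior year.\n"))) := by
  induction l with
  | nil => intro c m; simp [PySem.Str.join, PySem.Chars.join, List.intercalate]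
  | cons a l ih =>
      intro c m
      by_cases ha : PySem.Str.isIn " 1" a
      · simp only [List.foldl_cons, List.filter_cons, ha, if_pos, ih, List.map_cons,
          pv_strjoin_nil_cons, List.length_cons, Prod.mk.injEq]
        refine ⟨by push_cast; ring, by rw [String.append_assoc]⟩
      · simp only [List.foldl_cons, List.filter_cons, ha, ih]
        simp

-- A's negative-index gather equals the k-semester tail, flattened
theorem pv_range_fold (xs : List (List String)) (k : Nat) (h1 : 1 ≤ k) (h3 : k ≤ 3)
    (h2 : k ≤ xs.length) :
    (PySem.List.pyRange (-(k : Int)) 0 1).foldl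
      (fun acc i => acc ++ ((PySem.List.pyGet? xs i).getD [])) []
    = (xs.drop (xs.length - k)).flatMap id := by
  interval_cases k
  · have hr : PySem.List.pyRange (-(1 : Int)) 0 1 = [-1] := by decide
    simp only [Nat.cast_one]
    rw [hr]
    have g1 := PySem.List.pyGet?_neg_ofNat xs 1 (by omega) h2
    have e1 : xs.length - 1 < xs.length := by omega
    simp only [List.foldl_cons, List.foldl_nil, g1, List.getElem?_eq_getElem e1,
      Option.getD_some, List.nil_append]
    rw [List.drop_eq_getElem_cons e1]
    have : xs.length - 1 + 1 = xs.length := by omega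
    rw [this, List.drop_length]
    simp
  · have hr : PySem.List.pyRange (-(2 : Int)) 0 1 = [-2, -1] := by decide
    simp only [Nat.cast_ofNat]
    rw [hr]
    have g2 := PySem.List.pyGet?_neg_ofNat xs 2 (by omega) h2
    have g1 := PySem.List.pyGet?_neg_ofNat xs 1 (by omega) (by omega)
    have e2 : xs.length - 2 < xs.length := by omega
    have e1 : xs.length - 1 < xs.length := by omega
    simp only [List.foldl_cons, List.foldl_nil, g1, g2, List.getElem?_eq_getElem e1,
      List.getElem?_eq_getElem e2, Option.getD_some, List.nil_append]
    rw [List.drop_eq_getElem_cons e2]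
    have h21 : xs.length - 2 + 1 = xs.length - 1 := by omega
    rw [h21, List.drop_eq_getElem_cons e1]
    have h10 : xs.length - 1 + 1 = xs.length := by omega
    rw [h10, List.drop_length]
    simp
  · have hr : PySem.List.pyRange (-(3 : Int)) 0 1 = [-3, -2, -1] := by decide
    simp only [Nat.cast_ofNat]
    rw [hr]
    have g3 := PySem.List.pyGet?_neg_ofNat xs 3 (by omega) h2
    have g2 := PySem.List.pyGet?_neg_ofNat xs 2 (by omega) (by omega)
    have g1 := PySem.List.pyGet?_neg_ofNat xs 1 (by omega) (by omega)
    have e3 : xs.length - 3 < xs.length := by omega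
    have e2 : xs.length - 2 < xs.length := by omega
    have e1 : xs.length - 1 < xs.length := by omega
    simp only [List.foldl_cons, List.foldl_nil, g1, g2, g3, List.getElem?_eq_getElem e1,
      List.getElem?_eq_getElem e2, List.getElem?_eq_getElem e3, Option.getD_some,
      List.nil_append]
    rw [List.drop_eq_getElem_cons e3]
    have h32 : xs.length - 3 + 1 = xs.length - 2 := by omega
    rw [h32, List.drop_eq_getElem_cons e2]
    have h21 : xs.length - 2 + 1 = xs.length - 1 := by omega
    rw [h21, List.drop_eq_getElem_cons e1]
    have h10 : xs.length - 1 + 1 = xs.length := by omega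
    rw [h10, List.drop_length]
    simp

-- ===== VERDICT (by name: the statement is the Claim_ definition above) =====
theorem senior_with_1000_level_count_spec : Claim_equal_senior_with_1000_level_count := by
  intro schedule _
  unfold Spec_senior_with_1000_level_count
  unfold senior_with_1000_level_count senior_with_1000_level_count_alt senior_year_semesters_list
  by_cases hd : schedule = [] ∨ schedule = [[]]
  · rw [if_pos hd, if_pos hd]
  · rw [if_neg hd, if_neg hd]
    have hne : schedule ≠ [] := fun h => hd (Or.inl h)
    have hpos : 0 < schedule.length := List.length_pos_iff.mpr hne
    set k : Nat := (schedule.length - 1) % 3 + 1 with hk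
    have hk1 : 1 ≤ k := by omega
    have hk3 : k ≤ 3 := by omega
    have hkl : k ≤ schedule.length := by omega
    rw [pv_interval_eq schedule hne]
    simp only [Option.getD_some, ← hk]
    rw [pv_range_fold schedule k hk1 hk3 hkl, pv_count_fold]
    rw [PySem.List.slice_from_neg_natCast _ _ (by omega)]
    simp [List.flatMap_def, List.filter_flatten]
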